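-- pv_equiv track=rewrite | github.com/clasenback/EulerProject | Problems/P0021 - Números amigos.py | firstPrimeFactor
-- ===== SOURCE A (Python) =====
-- def nextPrime(n, primos):
--     if n % 2 == 0:
--         n +=1
--     isPrime = False
--     while not isPrime:
--         for primo in primos:
--             if n % primo == 0:
--                 n +=2
--                 break
--             if primo == primos[-1]:
--                 isPrime = not isPrime
--     return n
--
-- def firstPrimeFactor(n):
--     primos = [2]
--     fatores = []
--     if n == 1 :
--         return 1
--     while n > 1:
--         if n % primos[-1] == 0:
--             n = n / primos[-1]
--             fatores.append(primos[-1])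
--             break
--         else:
--             primos.append(nextPrime(primos[-1], primos))
--     return fatores[0]
-- ===== SOURCE B (Python) =====
-- def firstPrimeFactor(n):
--     if n == 1:
--         return 1
--     if n % 2 == 0:
--         return 2
--     f = 3
--     while f * f <= n:
--         if n % f == 0:
--             return f
--         f += 2
--     return n
-- ===== Notes on version B (the rewrite author's own statement) =====
-- stated objective: alternative
-- what changed: A generates the full increasing list of primes (each found by trial-dividing candidates against all previously found primes) until one divides n; B trial-divides n directly by two and then by successive odd candidates up to its square root, returning n itself if no divisor is found.
import Mathlib
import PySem

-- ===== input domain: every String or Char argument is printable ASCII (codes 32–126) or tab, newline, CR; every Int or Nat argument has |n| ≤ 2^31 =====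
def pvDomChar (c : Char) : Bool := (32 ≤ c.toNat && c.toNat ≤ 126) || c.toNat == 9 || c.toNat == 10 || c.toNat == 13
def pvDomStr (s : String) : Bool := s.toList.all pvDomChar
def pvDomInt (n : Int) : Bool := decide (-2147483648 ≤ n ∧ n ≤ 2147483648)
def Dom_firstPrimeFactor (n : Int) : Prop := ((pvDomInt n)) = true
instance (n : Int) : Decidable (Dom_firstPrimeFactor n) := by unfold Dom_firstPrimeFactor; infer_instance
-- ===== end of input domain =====

-- B replaces A's incremental prime-list generation with direct trial division by 2 and then odd f up to √n.

-- ===== PORT A =====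
-- A's two `while` loops are unbounded on unreachable states, so each is ported
-- with a fuel counter that provably suffices on every state A actually reaches
-- (fuel is a totality guard only; the proofs show it is never exhausted under Pre_).

-- the `for primo in primos:` body inside nextPrime; returns the pair (n, isPrime) after the loop/break
def pvScan (last : Int) (m : Int) (isP : Bool) : List Int → Int × Bool
  | [] => (m, isP)
  | p :: rest =>
      if PySem.Int.mod m p = 0 then (m + 2, isP)          -- n += 2; break
      else pvScan last m (if p = last then true else isP) rest

-- `while not isPrime:` of nextPrime
def pvNextPrimeLoop (primos : List Int) (last : Int) : Nat → Int → Bool → Int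
  | 0, m, _ => m                                           -- fuel exhausted (never reached under Pre_)
  | fuel + 1, m, isP =>
      if isP then m
      else
        let s := pvScan last m false primos
        pvNextPrimeLoop primos last fuel s.1 s.2

def nextPrime (n : Int) (primos : List Int) : Int :=
  let n := if PySem.Int.mod n 2 = 0 then n + 1 else n
  -- `primos[-1]` : primos is never empty at A's call sites, so the `.getD 0` default is dead
  let last := (PySem.List.pyGet? primos (-1)).getD 0
  pvNextPrimeLoop primos last (n.toNat + 3) n false

-- `while n > 1:` of firstPrimeFactor; returns the final `fatores`
def pvFpfLoop : Nat → Int → List Int → List Int → List Int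
  | 0, _, _, fatores => fatores                            -- fuel exhausted (never reached under Pre_)
  | fuel + 1, n, primos, fatores =>
      if n > 1 then
        let last := (PySem.List.pyGet? primos (-1)).getD 0
        if PySem.Int.mod n last = 0 then
          -- `n = n / primos[-1]` precedes the `break`; its value is never used afterwards
          fatores ++ [last]
        else pvFpfLoop fuel n (primos ++ [nextPrime last primos]) fatores
      else fatores

def firstPrimeFactor (n : Int) : Int :=
  if n = 1 then 1
  else
    let fatores := pvFpfLoop (n.toNat + 1) n [2] []
    -- `fatores[0]` : IndexError exactly on the nonpositive inputs excluded by Pre_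
    (PySem.List.pyGet? fatores 0).getD 0

-- ===== PORT B =====
-- `while f * f <= n:` of Source B
def pvTrialLoop (n : Int) (f : Int) : Int :=
  if f * f ≤ n then
    if PySem.Int.mod n f = 0 then f else pvTrialLoop n (f + 2)
  else n
termination_by (n + 1 - f).toNat
decreasing_by
  have hfn : f ≤ n := by
    rcases le_or_gt f 0 with h | h
    · have := mul_self_nonneg f; omega
    · have : f * 1 ≤ f * f := by
        apply mul_le_mul_of_nonneg_left <;> omega
      omega
  omega

def firstPrimeFactor_alt (n : Int) : Int :=
  if n = 1 then 1
  else if PySem.Int.mod n 2 = 0 then 2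
  else pvTrialLoop n 3

-- ===== PRECONDITION & SPEC =====
-- A raises IndexError (`fatores[0]` on an empty list) for every nonpositive n; those inputs are excluded.
def Pre_firstPrimeFactor (n : Int) : Prop := 1 ≤ n
instance (n : Int) : Decidable (Pre_firstPrimeFactor n) := by unfold Pre_firstPrimeFactor; infer_instance
def pvWitness_firstPrimeFactor : Int := 15

def Spec_firstPrimeFactor (n : Int) (out : Int) : Prop := out = firstPrimeFactor_alt n
instance (n : Int) (out : Int) : Decidable (Spec_firstPrimeFactor n out) := by unfold Spec_firstPrimeFactor; infer_instance

-- ===== CLAIM (what is proved, stated in full; the proofs are below) =====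
def Claim_equal_firstPrimeFactor : Prop := ∀ (n : Int), Dom_firstPrimeFactor n → Pre_firstPrimeFactor n → Spec_firstPrimeFactor n (firstPrimeFactor n)

-- ===== LEMMAS AND PROOFS =====

-- invariant of A's outer loop: l is exactly the increasing list of all primes ≤ p, ending in p
def pvInv (l : List Int) (p : Nat) : Prop :=
  l.getLast? = some (p : Int) ∧ p.Prime ∧ l.Pairwise (· < ·) ∧
  (∀ x ∈ l, ∃ r : Nat, x = (r : Int) ∧ r.Prime ∧ r ≤ p) ∧
  (∀ r : Nat, r.Prime → r ≤ p → (r : Int) ∈ l)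

lemma pvScan_eq (l : List Int) (last m : Int)
    (hs : l.Pairwise (· < ·)) (hl : l.getLast? = some last) :
    pvScan last m false l =
      if ∃ x ∈ l, PySem.Int.mod m x = 0 then (m + 2, false) else (m, true) := by
  induction l with
  | nil => simp at hl
  | cons p rest ih =>
    have hstep : pvScan last m false (p :: rest) =
        (if PySem.Int.mod m p = 0 then (m + 2, false)
         else pvScan last m (if p = last then true else false) rest) := rfl
    rw [hstep]
    by_cases hd : PySem.Int.mod m p = 0
    · rw [if_pos hd, if_pos ⟨p, List.mem_cons_self, hd⟩]
    · rw [if_neg hd]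
      cases rest with
      | nil =>
        have hp : p = last := by simpa using hl
        rw [if_pos hp]
        have : pvScan last m true [] = (m, true) := rfl
        rw [this, if_neg]
        rintro ⟨x, hx, hmod⟩
        simp at hx
        exact hd (hx ▸ hmod)
      | cons r rs =>
        have hlast : (r :: rs).getLast? = some last := by
          rwa [List.getLast?_cons_cons] at hl
        have hmemlast : last ∈ r :: rs := List.mem_of_getLast? hlast
        have hplt : p < last := (List.pairwise_cons.1 hs).1 last hmemlast
        have hpne : p ≠ last := ne_of_lt hplt
        rw [if_neg hpne, ih (List.pairwise_cons.1 hs).2 hlast]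
        by_cases hex : ∃ x ∈ r :: rs, PySem.Int.mod m x = 0
        · rw [if_pos hex, if_pos]
          obtain ⟨x, hx, hmod⟩ := hex
          exact ⟨x, List.mem_cons_of_mem _ hx, hmod⟩
        · rw [if_neg hex, if_neg]
          rintro ⟨x, hx, hmod⟩
          rcases List.mem_cons.1 hx with rfl | hx
          · exact hd hmod
          · exact hex ⟨x, hx, hmod⟩

lemma pvNextPrimeLoop_eq (l : List Int) (p q : Nat)
    (hinv : pvInv l p) (hq : q.Prime) (hpq : p < q)
    (hmin : ∀ r : Nat, r.Prime → p < r → q ≤ r) :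
    ∀ (fuel M : Nat), M % 2 = 1 → p ≤ M → M ≤ q → (q - M) / 2 + 2 ≤ fuel →
      pvNextPrimeLoop l (p : Int) fuel (M : Int) false = (q : Int) := by
  intro fuel
  induction fuel with
  | zero => intro M h1 h2 h3 h4; omega
  | succ f ih =>
    intro M hodd hpM hMq hfuel
    obtain ⟨hlast, hpp, hsort, hmem, hall⟩ := hinv
    have hstep : pvNextPrimeLoop l (p : Int) (f + 1) (M : Int) false =
        pvNextPrimeLoop l (p : Int) f (pvScan (p : Int) (M : Int) false l).1
          (pvScan (p : Int) (M : Int) false l).2 := rfl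
    rw [hstep, pvScan_eq l (p : Int) (M : Int) hsort hlast]
    rcases eq_or_lt_of_le hMq with heq | hlt
    · subst heq
      rw [if_neg ?_]
      · cases f with
        | zero => omega
        | succ f' => rfl
      · rintro ⟨x, hx, hmod⟩
        obtain ⟨r, rfl, hrp, hrle⟩ := hmem x hx
        have hdvd : (r : Int) ∣ (M : Int) := (PySem.Int.mod_eq_zero_iff_dvd _ _).1 hmod
        have hrdM : r ∣ M := Int.natCast_dvd_natCast.mp hdvd
        rcases Nat.Prime.eq_one_or_self_of_dvd hq r hrdM with h | h
        · exact Nat.Prime.one_lt hrp |>.ne' h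
        · omega
    · have hdiv : ∃ x ∈ l, PySem.Int.mod (M : Int) x = 0 := by
        rcases eq_or_lt_of_le hpM with heq | hplt
        · refine ⟨(p : Int), List.mem_of_getLast? hlast, ?_⟩
          rw [PySem.Int.mod_eq_zero_iff_dvd, ← heq]
        · have hMne1 : M ≠ 1 := by have := hpp.two_le; omega
          have hrp : M.minFac.Prime := Nat.minFac_prime hMne1
          have hrdvd : M.minFac ∣ M := Nat.minFac_dvd M
          have hrle : M.minFac ≤ p := by
            rcases le_or_gt M.minFac p with h | hc
            · exact h
            have h1 := hmin M.minFac hrp hc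
            have h2 := Nat.minFac_le (show 0 < M by omega)
            omega
          refine ⟨(M.minFac : Int), hall M.minFac hrp hrle, ?_⟩
          rw [PySem.Int.mod_eq_zero_iff_dvd]
          exact_mod_cast hrdvd
      rw [if_pos hdiv]
      have hqodd : q % 2 = 1 := by
        rcases Nat.Prime.eq_two_or_odd hq with h | h
        · have := hpp.two_le; omega
        · exact h
      have hcast : (M : Int) + 2 = ((M + 2 : Nat) : Int) := by push_cast; ring
      show pvNextPrimeLoop l (p : Int) f ((M : Int) + 2) false = (q : Int)
      rw [hcast]
      exact ih (M + 2) (by omega) (by omega) (by omega) (by omega)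

lemma pvNextPrime_eq (l : List Int) (p q : Nat)
    (hinv : pvInv l p) (hq : q.Prime) (hpq : p < q)
    (hmin : ∀ r : Nat, r.Prime → p < r → q ≤ r) (hq2 : q ≤ 2 * p) :
    nextPrime (p : Int) l = (q : Int) := by
  obtain ⟨hlast, hpp, hsort, hmem, hall⟩ := hinv
  simp only [nextPrime, PySem.List.pyGet?_neg_one, hlast, Option.getD_some]
  by_cases hev : PySem.Int.mod (p : Int) 2 = 0
  · have h2d : (2 : Int) ∣ (p : Int) := (PySem.Int.mod_eq_zero_iff_dvd _ _).1 hev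
    have h2dn : (2 : Nat) ∣ p := by exact_mod_cast h2d
    have hp2 : p = 2 := ((Nat.Prime.even_iff hpp).1 (even_iff_two_dvd.2 h2dn))
    subst hp2
    rw [if_pos hev]
    have hcast : ((2 : Nat) : Int) + 1 = ((3 : Nat) : Int) := by norm_num
    rw [hcast, Int.toNat_natCast]
    exact pvNextPrimeLoop_eq l 2 q ⟨hlast, hpp, hsort, hmem, hall⟩ hq hpq hmin 6 3
      (by omega) (by omega) (by omega) (by omega)
  · rw [if_neg hev]
    have hpodd : p % 2 = 1 := by
      rcases Nat.Prime.eq_two_or_odd hpp with h | h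
      · exfalso; apply hev
        rw [PySem.Int.mod_eq_zero_iff_dvd, h]
        norm_num
      · exact h
    rw [Int.toNat_natCast]
    exact pvNextPrimeLoop_eq l p q ⟨hlast, hpp, hsort, hmem, hall⟩ hq hpq hmin (p + 3) p
      hpodd (le_refl p) (le_of_lt hpq) (by have := hpp.two_le; omega)

lemma pvInv_extend (l : List Int) (p q : Nat)
    (hinv : pvInv l p) (hq : q.Prime) (hpq : p < q)
    (hmin : ∀ r : Nat, r.Prime → p < r → q ≤ r) :
    pvInv (l ++ [(q : Int)]) q := by
  obtain ⟨hlast, hpp, hsort, hmem, hall⟩ := hinv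
  refine ⟨List.getLast?_concat, hq, ?_, ?_, ?_⟩
  · rw [List.pairwise_append]
    refine ⟨hsort, List.pairwise_singleton _ _, ?_⟩
    intro x hx y hy
    obtain ⟨r, rfl, hrp, hrle⟩ := hmem x hx
    simp only [List.mem_singleton] at hy
    subst hy
    exact_mod_cast lt_of_le_of_lt hrle hpq
  · intro x hx
    rcases List.mem_append.1 hx with hx | hx
    · obtain ⟨r, rfl, hrp, hrle⟩ := hmem x hx
      exact ⟨r, rfl, hrp, le_trans hrle (le_of_lt hpq)⟩
    · simp only [List.mem_singleton] at hx
      subst hx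
      exact ⟨q, rfl, hq, le_refl _⟩
  · intro r hrp hrle
    rcases lt_or_ge p r with h | h
    · have hqr := hmin r hrp h
      have : r = q := le_antisymm hrle hqr
      subst this
      exact List.mem_append.2 (Or.inr (List.mem_singleton.2 rfl))
    · exact List.mem_append.2 (Or.inl (hall r hrp h))

lemma pvFpfLoop_eq (n : Int) (hn : 2 ≤ n) :
    ∀ (fuel : Nat) (p : Nat) (l : List Int), pvInv l p → p ≤ n.toNat.minFac →
      n.toNat.minFac - p + 1 ≤ fuel →
      pvFpfLoop fuel n l [] = [(n.toNat.minFac : Int)] := by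
  intro fuel
  induction fuel with
  | zero => intro p l hinv hple hfuel; omega
  | succ f ih =>
    intro p l hinv hple hfuel
    obtain ⟨hlast, hpp, hsort, hmem, hall⟩ := hinv
    have hncast : n = ((n.toNat : Nat) : Int) := (Int.toNat_of_nonneg (by omega)).symm
    have hstep : pvFpfLoop (f + 1) n l [] =
        (if n > 1 then
          (if PySem.Int.mod n ((PySem.List.pyGet? l (-1)).getD 0) = 0 then
            ([] : List Int) ++ [(PySem.List.pyGet? l (-1)).getD 0]
          else pvFpfLoop f n (l ++ [nextPrime ((PySem.List.pyGet? l (-1)).getD 0) l]) [])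
        else []) := rfl
    rw [hstep, if_pos (by omega : n > 1), PySem.List.pyGet?_neg_one, hlast, Option.getD_some]
    by_cases hdvd : PySem.Int.mod n (p : Int) = 0
    · rw [if_pos hdvd]
      have hd : (p : Int) ∣ n := (PySem.Int.mod_eq_zero_iff_dvd _ _).1 hdvd
      have hpd : p ∣ n.toNat := by
        rw [hncast] at hd; exact_mod_cast hd
      have hle2 : n.toNat.minFac ≤ p := Nat.minFac_le_of_dvd hpp.two_le hpd
      have hpe : p = n.toNat.minFac := le_antisymm hple hle2
      rw [hpe, List.nil_append]
    · rw [if_neg hdvd]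
      obtain ⟨q0, hq0le, hq0p⟩ := Nat.exists_infinite_primes (p + 1)
      have hex : ∃ r, r.Prime ∧ p < r := ⟨q0, hq0p, by omega⟩
      obtain ⟨hqp, hpq⟩ := Nat.find_spec hex
      have hmin : ∀ r : Nat, r.Prime → p < r → Nat.find hex ≤ r :=
        fun r h1 h2 => Nat.find_min' hex ⟨h1, h2⟩
      have hq2 : Nat.find hex ≤ 2 * p := by
        obtain ⟨r, hrp, h1, h2⟩ :=
          Nat.exists_prime_lt_and_le_two_mul p (by have := hpp.two_le; omega)
        exact le_trans (hmin r hrp h1) h2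
      rw [pvNextPrime_eq l p (Nat.find hex) ⟨hlast, hpp, hsort, hmem, hall⟩ hqp hpq hmin hq2]
      have hmfp : (n.toNat.minFac).Prime := Nat.minFac_prime (by omega)
      have hmfd : n.toNat.minFac ∣ n.toNat := Nat.minFac_dvd _
      have hne : p ≠ n.toNat.minFac := by
        rintro rfl
        apply hdvd
        rw [PySem.Int.mod_eq_zero_iff_dvd, hncast]
        exact_mod_cast hmfd
      have hqle : Nat.find hex ≤ n.toNat.minFac := hmin _ hmfp (by omega)
      exact ih (Nat.find hex) (l ++ [(Nat.find hex : Int)])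
        (pvInv_extend l p (Nat.find hex) ⟨hlast, hpp, hsort, hmem, hall⟩ hqp hpq hmin)
        hqle (by omega)

lemma pvA_eq_minFac (n : Int) (hn : 1 ≤ n) :
    firstPrimeFactor n = (n.toNat.minFac : Int) := by
  by_cases h1 : n = 1
  · subst h1
    simp [firstPrimeFactor]
  · have hn2 : 2 ≤ n := by omega
    unfold firstPrimeFactor
    rw [if_neg h1]
    have hinv0 : pvInv [2] 2 := by
      refine ⟨by norm_num, Nat.prime_two, by simp, ?_, ?_⟩
      · intro x hx
        simp only [List.mem_singleton] at hx
        subst hx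
        exact ⟨2, by norm_num, Nat.prime_two, le_refl _⟩
      · intro r hrp hrle
        have : r = 2 := le_antisymm hrle hrp.two_le
        subst this
        simp
    have h2le : 2 ≤ n.toNat.minFac := (Nat.minFac_prime (by omega)).two_le
    have hmle : n.toNat.minFac ≤ n.toNat := Nat.minFac_le (by omega)
    rw [pvFpfLoop_eq n hn2 (n.toNat + 1) 2 [2] hinv0 h2le (by omega)]
    rfl

lemma pvTrialLoop_eq (k : Nat) : ∀ (n f : Int), (n + 1 - f).toNat ≤ k → 1 ≤ n → 1 ≤ f →
    pvTrialLoop n f = (Nat.minFacAux n.toNat f.toNat : Int) := by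
  induction k with
  | zero =>
    intro n f hk hn hf
    have hf0 : (f.toNat : Int) = f := Int.toNat_of_nonneg (by omega)
    have hn0 : (n.toNat : Int) = n := Int.toNat_of_nonneg (by omega)
    have hfn : n + 1 ≤ f := by omega
    have hle : f ≤ f * f := by
      calc f = f * 1 := (mul_one f).symm
        _ ≤ f * f := mul_le_mul_of_nonneg_left hf (by omega)
    have hff : ¬ f * f ≤ n := by omega
    have hcast : ((f.toNat * f.toNat : Nat) : Int) = f * f := by
      push_cast
      rw [hf0]
    have hnat : n.toNat < f.toNat * f.toNat := by
      have : (n.toNat : Int) < ((f.toNat * f.toNat : Nat) : Int) := by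
        rw [hn0, hcast]; omega
      exact_mod_cast this
    rw [pvTrialLoop, if_neg hff, Nat.minFacAux, if_pos hnat]
    exact hn0.symm
  | succ k ih =>
    intro n f hk hn hf
    have hf0 : (f.toNat : Int) = f := Int.toNat_of_nonneg (by omega)
    have hn0 : (n.toNat : Int) = n := Int.toNat_of_nonneg (by omega)
    have hcast : ((f.toNat * f.toNat : Nat) : Int) = f * f := by
      push_cast
      rw [hf0]
    rw [pvTrialLoop, Nat.minFacAux]
    by_cases hle : f * f ≤ n
    · have hnat : ¬ n.toNat < f.toNat * f.toNat := by
        have : ((f.toNat * f.toNat : Nat) : Int) ≤ (n.toNat : Int) := by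
          rw [hn0, hcast]; omega
        have := Nat.cast_le (α := Int) |>.mp this
        omega
      rw [if_pos hle, if_neg hnat]
      by_cases hmod : PySem.Int.mod n f = 0
      · have hdvd : f.toNat ∣ n.toNat := by
          have hd : f ∣ n := (PySem.Int.mod_eq_zero_iff_dvd _ _).1 hmod
          rw [← hf0, ← hn0] at hd
          exact_mod_cast hd
        rw [if_pos hmod, if_pos hdvd]
        exact hf0.symm
      · have hdvd : ¬ f.toNat ∣ n.toNat := by
          intro hd
          apply hmod
          rw [PySem.Int.mod_eq_zero_iff_dvd, ← hf0, ← hn0]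
          exact_mod_cast hd
        rw [if_neg hmod, if_neg hdvd]
        have hfle : f ≤ n := by
          calc f = f * 1 := (mul_one f).symm
            _ ≤ f * f := mul_le_mul_of_nonneg_left hf (by omega)
            _ ≤ n := hle
        have h2 : (f + 2).toNat = f.toNat + 2 := by omega
        rw [← h2]
        exact ih n (f + 2) (by omega) hn (by omega)
    · rw [if_neg hle, if_pos ?_]
      · exact hn0.symm
      · have : (n.toNat : Int) < ((f.toNat * f.toNat : Nat) : Int) := by
          rw [hn0, hcast]; omega
        exact_mod_cast this

lemma pvB_eq_minFac (n : Int) (hn : 1 ≤ n) :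
    firstPrimeFactor_alt n = (n.toNat.minFac : Int) := by
  unfold firstPrimeFactor_alt
  by_cases h1 : n = 1
  · subst h1
    rw [if_pos rfl]
    norm_num
  · rw [if_neg h1]
    have hn2 : 2 ≤ n := by omega
    have hn0 : (n.toNat : Int) = n := Int.toNat_of_nonneg (by omega)
    by_cases hev : PySem.Int.mod n 2 = 0
    · rw [if_pos hev]
      have hd : (2 : Int) ∣ n := (PySem.Int.mod_eq_zero_iff_dvd _ _).1 hev
      have h2 : 2 ∣ n.toNat := by
        rw [← hn0] at hd
        exact_mod_cast hd
      rw [Nat.minFac_eq, if_pos h2]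
      norm_num
    · rw [if_neg hev]
      have hnd : ¬ 2 ∣ n.toNat := by
        intro h
        apply hev
        rw [PySem.Int.mod_eq_zero_iff_dvd, ← hn0]
        exact_mod_cast h
      rw [Nat.minFac_eq, if_neg hnd]
      have h := pvTrialLoop_eq (n + 1 - 3).toNat n 3 (le_refl _) (by omega) (by omega)
      rw [show ((3 : Int)).toNat = 3 from rfl] at h
      exact h

-- ===== VERDICT (by name: the statement is the Claim_ definition above) =====
theorem firstPrimeFactor_spec : Claim_equal_firstPrimeFactor := by
  intro n _ hpre
  unfold Spec_firstPrimeFactor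
  rw [pvA_eq_minFac n hpre, pvB_eq_minFac n hpre]
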